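-- pv_equiv track=rewrite | github.com/shruthi-ms/Search-Engine-Python-Django | searchEngine/App/FileHandler.py | getUniqueTerms
-- ===== SOURCE A (Python) =====
-- def getUniqueTerms(WordsList):
--     MyList = []
--     for i in range(len(WordsList)):
--         MyList = MyList + WordsList[i]
--     MyList = set(MyList)
--     MyList = list(MyList)
--     MyList.sort()
--     return MyList
-- ===== SOURCE B (Python) =====
-- def getUniqueTerms(WordsList):
--     flat = []
--     for sub in WordsList:
--         flat = flat + sub
--     flat.sort()
--     result = []
--     prev = None
--     for w in flat:
--         if prev is None or w != prev:
--             result.append(w)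
--             prev = w
--     return result
-- ===== Notes on version B (the rewrite author's own statement) =====
-- stated objective: alternative
-- what changed: B sorts the flattened list first and removes duplicates in one linear adjacent-comparison pass (tracking the previously kept word), instead of A's hash-set deduplication followed by sorting.
import Mathlib
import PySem

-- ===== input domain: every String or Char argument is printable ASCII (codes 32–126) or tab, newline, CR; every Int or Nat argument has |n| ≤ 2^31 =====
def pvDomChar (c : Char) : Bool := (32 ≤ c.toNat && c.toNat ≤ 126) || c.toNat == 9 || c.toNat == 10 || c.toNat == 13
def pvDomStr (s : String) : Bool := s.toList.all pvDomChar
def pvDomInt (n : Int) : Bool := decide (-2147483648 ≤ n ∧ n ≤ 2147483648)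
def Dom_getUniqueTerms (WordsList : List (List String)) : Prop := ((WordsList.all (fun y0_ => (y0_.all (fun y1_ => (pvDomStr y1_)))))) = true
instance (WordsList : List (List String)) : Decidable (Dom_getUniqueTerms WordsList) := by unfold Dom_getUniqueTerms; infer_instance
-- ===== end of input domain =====

-- B re-implements A (set-dedup then sort) as sort-then-adjacent-dedup in one linear pass; alternative decomposition, same results.
-- ===== PORT A =====
def getUniqueTerms (WordsList : List (List String)) : List String :=
  let MyList : List String :=
    (PySem.List.pyRange 0 (WordsList.length : Int) 1).foldl
      (fun acc i => acc ++ PySem.List.pyGetD WordsList i []) []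
  PySem.List.sorted (PySem.Set.ofList MyList) (fun x => x) false

-- ===== PORT B =====
def getUniqueTerms_alt (WordsList : List (List String)) : List String :=
  let flat : List String := WordsList.foldl (fun acc sub => acc ++ sub) []
  let s := PySem.List.sorted flat (fun x => x) false
  let r := s.foldl
    (fun st w => if st.2 = none ∨ st.2 ≠ some w then (st.1 ++ [w], some w) else st)
    (([] : List String), (none : Option String))
  r.1

-- ===== PRECONDITION & SPEC =====
def Spec_getUniqueTerms (WordsList : List (List String)) (out : List String) : Prop := out = getUniqueTerms_alt WordsList
instance (WordsList : List (List String)) (out : List String) : Decidable (Spec_getUniqueTerms WordsList out) := by unfold Spec_getUniqueTerms; infer_instance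

-- ===== CLAIM (what is proved, stated in full; the proofs are below) =====
def Claim_equal_getUniqueTerms : Prop := ∀ (WordsList : List (List String)), Dom_getUniqueTerms WordsList → Spec_getUniqueTerms WordsList (getUniqueTerms WordsList)

-- ===== LEMMAS AND PROOFS =====

-- structural model of B's dedup loop once the first element has been kept (prev = some p)
def dedupFrom (p : String) : List String → List String
  | [] => []
  | x :: t => if x = p then dedupFrom p t else x :: dedupFrom x t

-- B's foldl from a state whose prev is 'some p' builds acc ++ dedupFrom p l (first component)
theorem foldl_dedup_fst (l : List String) : ∀ (acc : List String) (p : String),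
    (l.foldl (fun st w => if st.2 = none ∨ st.2 ≠ some w then (st.1 ++ [w], some w) else st)
      ((acc, some p) : List String × Option String)).1 = acc ++ dedupFrom p l := by
  induction l with
  | nil => intro acc p; simp [dedupFrom]
  | cons x t ih =>
    intro acc p
    by_cases hxp : x = p
    · subst hxp
      simp [List.foldl_cons, dedupFrom, ih]
    · have : ((some p : Option String) = none ∨ (some p : Option String) ≠ some x) := by
        right; simp [Ne]; intro h; exact hxp h.symm
      simp only [List.foldl_cons, if_pos this]
      rw [ih]
      simp [dedupFrom, hxp]

-- key properties of dedupFrom on a (≤)-sorted tail whose elements are all ≥ p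
theorem dedupFrom_props (t : List String) : ∀ (p : String),
    t.Pairwise (fun a b => a ≤ b) → (∀ y ∈ t, p ≤ y) →
    (∀ a, a ∈ dedupFrom p t ↔ (a ∈ t ∧ a ≠ p)) ∧
    (∀ a ∈ dedupFrom p t, p < a) ∧
    (dedupFrom p t).Pairwise (fun a b => a < b) := by
  induction t with
  | nil => intro p _ _; simp [dedupFrom]
  | cons x t' ih =>
    intro p hpw hge
    have hx_le : ∀ y ∈ t', x ≤ y := (List.pairwise_cons.mp hpw).1
    have hpw' : t'.Pairwise (fun a b => a ≤ b) := (List.pairwise_cons.mp hpw).2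
    have hpx : p ≤ x := hge x (List.mem_cons_self)
    by_cases hxp : x = p
    · subst hxp
      obtain ⟨hm, hgt, hpw2⟩ := ih x hpw' hx_le
      have hres0 : dedupFrom x (x :: t') = dedupFrom x t' := by simp [dedupFrom]
      rw [hres0]
      refine ⟨?_, hgt, hpw2⟩
      intro a
      rw [hm a]
      constructor
      · rintro ⟨ha, hne⟩; exact ⟨List.mem_cons_of_mem _ ha, hne⟩
      · rintro ⟨ha, hne⟩
        rcases List.mem_cons.mp ha with h | h
        · exact absurd h hne
        · exact ⟨h, hne⟩
    · have hplt : p < x := lt_of_le_of_ne hpx (fun h => hxp h.symm)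
      obtain ⟨hm, hgt, hpw2⟩ := ih x hpw' hx_le
      have hres : dedupFrom p (x :: t') = x :: dedupFrom x t' := by
        simp [dedupFrom, hxp]
      refine ⟨?_, ?_, ?_⟩
      · intro a
        rw [hres]
        simp only [List.mem_cons]
        constructor
        · rintro (rfl | h)
          · exact ⟨Or.inl rfl, fun h => hxp h⟩
          · obtain ⟨ha, _⟩ := (hm a).mp h
            refine ⟨Or.inr ha, ?_⟩
            have := hx_le a ha
            exact ne_of_gt (lt_of_lt_of_le hplt this)
        · rintro ⟨ha, hne⟩
          rcases ha with h | h
          · exact Or.inl h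
          · by_cases hax : a = x
            · exact Or.inl hax
            · exact Or.inr ((hm a).mpr ⟨h, hax⟩)
      · intro a ha
        rw [hres] at ha
        rcases List.mem_cons.mp ha with rfl | h
        · exact hplt
        · exact lt_trans hplt (hgt a h)
      · rw [hres]
        exact List.pairwise_cons.mpr ⟨hgt, hpw2⟩

-- B's whole dedup pass on a (≤)-sorted list: same members as the input, strictly increasing
theorem dedup_pass_props (s : List String) (hs : s.Pairwise (fun a b => a ≤ b)) :
    (∀ a, a ∈ (s.foldl (fun st w => if st.2 = none ∨ st.2 ≠ some w then (st.1 ++ [w], some w) else st)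
      (([] : List String), (none : Option String))).1 ↔ a ∈ s) ∧
    ((s.foldl (fun st w => if st.2 = none ∨ st.2 ≠ some w then (st.1 ++ [w], some w) else st)
      (([] : List String), (none : Option String))).1).Pairwise (fun a b => a < b) := by
  cases s with
  | nil => simp
  | cons x t =>
    have hx_le : ∀ y ∈ t, x ≤ y := (List.pairwise_cons.mp hs).1
    have hpw' : t.Pairwise (fun a b => a ≤ b) := (List.pairwise_cons.mp hs).2
    obtain ⟨hm, hgt, hpw2⟩ := dedupFrom_props t x hpw' hx_le
    have hstep : (List.foldl (fun st w => if st.2 = none ∨ st.2 ≠ some w then (st.1 ++ [w], some w) else st)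
        (([] : List String), (none : Option String)) (x :: t)).1 = x :: dedupFrom x t := by
      simp only [List.foldl_cons]
      simpa using foldl_dedup_fst t [x] x
    rw [hstep]
    constructor
    · intro a
      simp only [List.mem_cons]
      constructor
      · rintro (rfl | h)
        · exact Or.inl rfl
        · exact Or.inr ((hm a).mp h).1
      · rintro (rfl | h)
        · exact Or.inl rfl
        · by_cases hax : a = x
          · exact Or.inl hax
          · exact Or.inr ((hm a).mpr ⟨h, hax⟩)
    · exact List.pairwise_cons.mpr ⟨hgt, hpw2⟩

-- ===== VERDICT (by name: the statement is the Claim_ definition above) =====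
theorem getUniqueTerms_spec : Claim_equal_getUniqueTerms := by
  intro WordsList _
  unfold Spec_getUniqueTerms getUniqueTerms getUniqueTerms_alt
  -- the two flattenings agree
  have hflat : (PySem.List.pyRange 0 (WordsList.length : Int) 1).foldl
      (fun acc i => acc ++ PySem.List.pyGetD WordsList i []) []
      = WordsList.foldl (fun acc sub => acc ++ sub) [] := by
    exact PySem.List.foldl_pyRange_zero_pyGetD' (xs := WordsList) (f := fun acc sub => acc ++ sub) (d := []) (init := [])
  rw [hflat]
  set flat := WordsList.foldl (fun acc sub => acc ++ sub) [] with hf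
  set s := PySem.List.sorted flat (fun x => x) false with hsdef
  have hs : s.Pairwise (fun a b => a ≤ b) := by
    simpa using PySem.List.sorted_pairwise (xs := flat) (key := fun x => x)
  obtain ⟨hmem, hlt⟩ := dedup_pass_props s hs
  set r := (s.foldl (fun st w => if st.2 = none ∨ st.2 ≠ some w then (st.1 ++ [w], some w) else st)
      (([] : List String), (none : Option String))).1 with hr
  have hnodup_r : r.Nodup := hlt.imp (fun h => ne_of_lt h)
  have hperm : r.Perm (PySem.Set.ofList flat) := by
    rw [List.perm_ext_iff_of_nodup hnodup_r (PySem.Set.nodup_ofList flat)]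
    intro a
    rw [PySem.Set.mem_ofList, hmem a, hsdef, PySem.List.mem_sorted]
  show PySem.List.sorted (PySem.Set.ofList flat) (fun x => x) false = r
  exact (PySem.List.sorted_eq_of_perm_of_pairwise_lt (PySem.Set.ofList flat) r (fun x => x) hperm hlt)
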